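-- pv_equiv track=rewrite | github.com/RJD60089/cdm_generator | src/edw/edw_mapping_prep.py | _find_ni_sheet
-- ===== SOURCE A (Python) =====
-- from typing import Optional
--
-- def _find_ni_sheet(sheet_names: list) -> Optional[str]:
--     """
--     Fallback sheet finder for files with non-standard sheet naming.
--     Prefers sheets containing 'NI Target' (multi-target files like PAID_LOOPS_*).
--     Falls back to any sheet whose name starts with a known source-to-target prefix.
--     Ignores Notes, OVERRIDE, and audit target sheets.
--     """
--     # Priority 1: sheet explicitly marked as NI Target
--     for name in sheet_names:
--         if "NI Target" in name or "NI_Target" in name: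
--             return name
--     # Priority 2: any SRC_to_TGT or Source_to_Target sheet (take first)
--     for name in sheet_names:
--         nl = name.lower()
--         if nl.startswith("src_to_tgt") or nl.startswith("source_to_target") or nl.startswith("source to target"):
--             return name
--     return None
-- ===== SOURCE B (Python) =====
-- from typing import Optional
--
-- def _find_ni_sheet(sheet_names: list) -> Optional[str]:
--     # Single backward pass (a right fold): walking the list in reverse, keep the
--     # most recently seen NI-Target name and prefix name; after the pass each
--     # variable holds the FIRST such name in original order. Return NI, else prefix.
--     ni = None
--     pre = None
--     for name in reversed(sheet_names):
--         if "NI Target" in name or "NI_Target" in name: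
--             ni = name
--         nl = name.lower()
--         if nl.startswith("src_to_tgt") or nl.startswith("source_to_target") or nl.startswith("source to target"):
--             pre = name
--     return ni if ni is not None else pre
-- ===== Notes on version B (the rewrite author's own statement) =====
-- stated objective: alternative
-- what changed: Replaces A's two forward early-return scans with one backward pass (a right fold) that maintains a pair of candidates (first NI-Target name, first prefix name) and combines them at the end.
import Mathlib
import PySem

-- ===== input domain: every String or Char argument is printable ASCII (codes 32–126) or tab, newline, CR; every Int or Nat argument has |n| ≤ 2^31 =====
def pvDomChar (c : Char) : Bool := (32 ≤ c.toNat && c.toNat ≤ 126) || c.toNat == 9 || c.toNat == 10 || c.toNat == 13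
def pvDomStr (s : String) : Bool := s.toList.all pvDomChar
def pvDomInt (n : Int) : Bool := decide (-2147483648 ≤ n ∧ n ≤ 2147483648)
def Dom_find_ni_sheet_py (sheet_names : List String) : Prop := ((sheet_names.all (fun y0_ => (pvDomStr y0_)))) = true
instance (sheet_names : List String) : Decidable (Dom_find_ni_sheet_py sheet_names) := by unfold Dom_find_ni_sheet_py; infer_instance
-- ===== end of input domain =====

-- B replaces A's two forward early-return scans with one backward pass (right fold)
-- keeping a pair of candidates (first NI-Target name, first prefix name).


-- ===== PORT A =====
-- '"NI Target" in name or "NI_Target" in name'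
def aIsNI (name : String) : Bool :=
  PySem.Str.isIn "NI Target" name || PySem.Str.isIn "NI_Target" name

-- 'nl = name.lower(); nl.startswith(...) or ... or ...'
def aIsPrefix (name : String) : Bool :=
  let nl := PySem.Str.lower name
  PySem.Str.startswith nl "src_to_tgt" || PySem.Str.startswith nl "source_to_target" ||
    PySem.Str.startswith nl "source to target"

-- first loop: 'for name in sheet_names: if …: return name'
def aLoop1 : List String → Option String
  | [] => none
  | name :: rest => if aIsNI name then some name else aLoop1 rest

-- second loop
def aLoop2 : List String → Option String
  | [] => none
  | name :: rest => if aIsPrefix name then some name else aLoop2 rest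

def find_ni_sheet_py (sheet_names : List String) : Option String :=
  match aLoop1 sheet_names with
  | some name => some name
  | none => aLoop2 sheet_names

-- ===== PORT B =====
-- one step of the backward pass over (ni, pre)
def bStep (name : String) (acc : Option String × Option String) : Option String × Option String :=
  let ni := if PySem.Str.isIn "NI Target" name || PySem.Str.isIn "NI_Target" name then some name else acc.1
  let nl := PySem.Str.lower name
  let pre := if PySem.Str.startswith nl "src_to_tgt" || PySem.Str.startswith nl "source_to_target" ||
      PySem.Str.startswith nl "source to target" then some name else acc.2
  (ni, pre)

def find_ni_sheet_py_alt (sheet_names : List String) : Option String :=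
  -- 'for name in reversed(sheet_names): …' is a right fold over the list
  let p := sheet_names.foldr bStep (none, none)
  match p.1 with
  | some n => some n
  | none => p.2

-- ===== PRECONDITION & SPEC =====
def Spec_find_ni_sheet_py (sheet_names : List String) (out : Option String) : Prop := out = find_ni_sheet_py_alt sheet_names
instance (sheet_names : List String) (out : Option String) : Decidable (Spec_find_ni_sheet_py sheet_names out) := by unfold Spec_find_ni_sheet_py; infer_instance

-- ===== CLAIM (what is proved, stated in full; the proofs are below) =====
def Claim_equal_find_ni_sheet_py : Prop := ∀ (sheet_names : List String), Dom_find_ni_sheet_py sheet_names → Spec_find_ni_sheet_py sheet_names (find_ni_sheet_py sheet_names)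

-- ===== LEMMAS AND PROOFS =====
theorem foldr_bStep_eq (xs : List String) :
    xs.foldr bStep (none, none) = (aLoop1 xs, aLoop2 xs) := by
  induction xs with
  | nil => rfl
  | cons name rest ih =>
    simp only [List.foldr, ih, bStep, aLoop1, aLoop2, aIsNI, aIsPrefix]
    split_ifs <;> rfl

-- ===== VERDICT (by name: the statement is the Claim_ definition above) =====
theorem find_ni_sheet_py_spec : Claim_equal_find_ni_sheet_py := by
  intro xs _
  unfold Spec_find_ni_sheet_py find_ni_sheet_py find_ni_sheet_py_alt
  rw [foldr_bStep_eq]
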